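-- pv_equiv track=rewrite | github.com/YunusYakinWangi/pytorch | torch/_inductor/fx_passes/profile_guided_estimation.py | _rank_stride
-- ===== SOURCE A (Python) =====
-- def _rank_stride(ranks: tuple[int, ...]) -> int | None:
--     """Compute the stride of a sorted rank tuple, or None if non-uniform.
--
--     Examples:
--         (0, 2, 4, 6) → stride 2
--         (0, 1)       → stride 1
--         (1, 3, 5, 7) → stride 2
--         (0, 1, 4, 5) → None (non-uniform)
--     """
--     if len(ranks) <= 1:
--         return None
--     stride = ranks[1] - ranks[0]
--     if stride <= 0:
--         return None
--     for i in range(2, len(ranks)):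
--         if ranks[i] - ranks[i - 1] != stride:
--             return None
--     return stride
-- ===== SOURCE B (Python) =====
-- def _rank_stride(ranks: tuple[int, ...]) -> int | None:
--     """Compute the stride of a sorted rank tuple, or None if non-uniform.
--
--     Instead of scanning consecutive differences, build the expected arithmetic
--     sequence and compare it wholesale.
--     """
--     if len(ranks) <= 1:
--         return None
--     first = ranks[0]
--     stride = ranks[1] - first
--     if stride <= 0:
--         return None
--     if tuple(ranks) == tuple(range(first, first + stride * len(ranks), stride)):
--         return stride
--     return None
-- ===== Notes on version B (the rewrite author's own statement) =====
-- stated objective: alternative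
-- what changed: Replaced the index loop over consecutive differences by constructing the expected arithmetic sequence range(first, first+stride*len, stride) and comparing it to the input in one equality test.
import Mathlib
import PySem

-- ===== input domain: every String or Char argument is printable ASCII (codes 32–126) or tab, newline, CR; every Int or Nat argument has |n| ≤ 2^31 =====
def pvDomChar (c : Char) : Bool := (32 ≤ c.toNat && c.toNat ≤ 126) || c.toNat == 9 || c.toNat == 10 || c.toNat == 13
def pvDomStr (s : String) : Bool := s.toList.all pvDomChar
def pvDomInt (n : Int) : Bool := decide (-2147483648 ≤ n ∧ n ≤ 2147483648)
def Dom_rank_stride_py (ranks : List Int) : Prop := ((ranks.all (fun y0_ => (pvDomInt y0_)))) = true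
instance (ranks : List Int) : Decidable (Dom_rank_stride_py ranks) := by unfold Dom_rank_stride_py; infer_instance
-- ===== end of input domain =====

-- B replaces A's loop over consecutive differences by building the expected
-- arithmetic sequence and comparing it to the input in one equality test (alternative, same cost).

-- ===== PORT A =====
def rank_stride_py (ranks : List Int) : Option Int :=
  if ranks.length ≤ 1 then none
  else
    let stride := PySem.List.pyGetD ranks 1 0 - PySem.List.pyGetD ranks 0 0
    if stride ≤ 0 then none
    else if (PySem.List.pyRange 2 ranks.length 1).all
        (fun i => decide (PySem.List.pyGetD ranks i 0 - PySem.List.pyGetD ranks (i - 1) 0 = stride))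
      then some stride else none

-- ===== PORT B =====
def rank_stride_py_alt (ranks : List Int) : Option Int :=
  if ranks.length ≤ 1 then none
  else
    let first := PySem.List.pyGetD ranks 0 0
    let stride := PySem.List.pyGetD ranks 1 0 - first
    if stride ≤ 0 then none
    else if ranks = PySem.List.pyRange first (first + stride * ranks.length) stride
      then some stride else none

-- ===== PRECONDITION & SPEC =====
def Spec_rank_stride_py (ranks : List Int) (out : Option Int) : Prop := out = rank_stride_py_alt ranks
instance (ranks : List Int) (out : Option Int) : Decidable (Spec_rank_stride_py ranks out) := by unfold Spec_rank_stride_py; infer_instance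

-- ===== CLAIM (what is proved, stated in full; the proofs are below) =====
def Claim_equal_rank_stride_py : Prop := ∀ (ranks : List Int), Dom_rank_stride_py ranks → Spec_rank_stride_py ranks (rank_stride_py ranks)

-- ===== LEMMAS AND PROOFS =====

-- Forward invariant: from the pairwise-difference condition, every entry is first + stride * index.
lemma pv_arith_all (l : List Int) (s : Int)
    (h1 : l.getD 1 0 - l.getD 0 0 = s)
    (h : ∀ j : Nat, 2 ≤ j → j < l.length → l.getD j 0 - l.getD (j - 1) 0 = s) :
    ∀ i : Nat, i < l.length → l.getD i 0 = l.getD 0 0 + s * i := by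
  intro i
  induction i using Nat.strong_induction_on with
  | _ i ih =>
    intro hi
    match i with
    | 0 => simp
    | 1 =>
      have : ((1 : Nat) : Int) = 1 := by norm_num
      rw [this, mul_one]; omega
    | (k + 2) =>
      have hk := h (k + 2) (by omega) hi
      have ih1 := ih (k + 1) (by omega) (by omega)
      have hsub : k + 2 - 1 = k + 1 := by omega
      rw [hsub] at hk
      have hc2 : ((k + 2 : Nat) : Int) = ((k + 1 : Nat) : Int) + 1 := by push_cast; ring
      rw [hc2]
      nlinarith [hk, ih1]

-- The pairwise-difference condition is equivalent to being the arithmetic sequence.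
lemma pv_arith_char (l : List Int) (s : Int)
    (h1 : l.getD 1 0 - l.getD 0 0 = s) :
    ((∀ j : Nat, 2 ≤ j → j < l.length → l.getD j 0 - l.getD (j - 1) 0 = s) ↔
      l = (List.range l.length).map (fun k : Nat => l.getD 0 0 + s * (k : Int))) := by
  constructor
  · intro h
    apply List.ext_getElem (by simp)
    intro i hi hi'
    simp only [List.getElem_map, List.getElem_range]
    have := pv_arith_all l s h1 h i hi
    rwa [List.getD_eq_getElem l 0 hi] at this
  · intro h j hj2 hjl
    have hx : ∀ i (hi : i < l.length), l[i] = l.getD 0 0 + s * (i : Int) := by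
      intro i hi
      have := List.getElem_of_eq h hi
      simpa using this
    rw [List.getD_eq_getElem l 0 hjl, List.getD_eq_getElem l 0 (by omega : j - 1 < l.length),
        hx j hjl, hx (j - 1) (by omega)]
    have : ((j - 1 : Nat) : Int) = (j : Int) - 1 := by omega
    rw [this]; ring

-- Bridge: the Bool `.all` over range(2, len) is the Nat-quantified difference condition.
lemma pv_all_diffs (l : List Int) (s : Int) :
    ((PySem.List.pyRange 2 l.length 1).all
        (fun i => decide (PySem.List.pyGetD l i 0 - PySem.List.pyGetD l (i - 1) 0 = s)) = true)
    ↔ (∀ j : Nat, 2 ≤ j → j < l.length → l.getD j 0 - l.getD (j - 1) 0 = s) := by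
  simp only [List.all_eq_true, decide_eq_true_eq]
  constructor
  · intro h j hj2 hjl
    have hm : ((j : Nat) : Int) ∈ PySem.List.pyRange 2 l.length 1 := by
      rw [PySem.List.mem_pyRange_one]
      constructor <;> [exact_mod_cast hj2; exact_mod_cast hjl]
    have hh := h _ hm
    have e1 : ((j : Nat) : Int) - 1 = ((j - 1 : Nat) : Int) := by omega
    rw [e1, PySem.List.pyGetD_natCast, PySem.List.pyGetD_natCast] at hh
    exact hh
  · intro h i hi
    rw [PySem.List.mem_pyRange_one] at hi
    obtain ⟨h2i, hil⟩ := hi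
    have hj : i = ((i.toNat : Nat) : Int) := by omega
    rw [hj]
    have e1 : ((i.toNat : Nat) : Int) - 1 = ((i.toNat - 1 : Nat) : Int) := by omega
    rw [e1, PySem.List.pyGetD_natCast, PySem.List.pyGetD_natCast]
    exact h i.toNat (by omega) (by omega)

-- B's Python range, for a positive stride, is exactly the expected arithmetic sequence.
lemma pv_range_eq (x s : Int) (n : Nat) (hs : 0 < s) (hn : 2 ≤ n) :
    PySem.List.pyRange x (x + s * n) s = (List.range n).map (fun k : Nat => x + s * (k : Int)) := by
  rw [PySem.List.pyRange_of_pos _ _ hs]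
  have hb : x < x + s * n := by nlinarith [hs, hn, (by exact_mod_cast hn : (2 : Int) ≤ (n : Int))]
  have hd : (x + s * n - x + s - 1) / s = (n : Int) := by
    have h1 : x + s * n - x + s - 1 = (s - 1) + (n : Int) * s := by ring
    rw [h1, Int.add_mul_ediv_right _ _ (by omega), Int.ediv_eq_zero_of_lt (by omega) (by omega)]
    simp
  rw [if_pos hb, hd]
  simp

-- ===== VERDICT (by name: the statement is the Claim_ definition above) =====
theorem rank_stride_py_spec : Claim_equal_rank_stride_py := by
  intro ranks _
  unfold Spec_rank_stride_py rank_stride_py rank_stride_py_alt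
  have g0 : PySem.List.pyGetD ranks 0 0 = ranks.getD 0 0 := by
    simpa using PySem.List.pyGetD_natCast ranks 0 0
  have g1 : PySem.List.pyGetD ranks 1 0 = ranks.getD 1 0 := by
    simpa using PySem.List.pyGetD_natCast ranks 1 0
  simp only [g0, g1]
  by_cases hlen : ranks.length ≤ 1
  · rw [if_pos hlen, if_pos hlen]
  · rw [if_neg hlen, if_neg hlen]
    set s := ranks.getD 1 0 - ranks.getD 0 0 with hs_def
    by_cases hs : s ≤ 0
    · rw [if_pos hs, if_pos hs]
    · rw [if_neg hs, if_neg hs]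
      have hslt : 0 < s := by omega
      have hn2 : 2 ≤ ranks.length := by omega
      rw [pv_range_eq (ranks.getD 0 0) s ranks.length hslt hn2]
      have hiff := (pv_all_diffs ranks s).trans (pv_arith_char ranks s (by omega))
      by_cases hc : ranks = (List.range ranks.length).map (fun k : Nat => ranks.getD 0 0 + s * (k : Int))
      · rw [if_pos (hiff.mpr hc), if_pos hc]
      · rw [if_neg (fun h => hc (hiff.mp h)), if_neg hc]
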